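-- pv_equiv track=rewrite | github.com/monaxue/WEIRD-GPT | pickle_data.py | remove_extra
-- ===== SOURCE A (Python) =====
-- def remove_extra(answer):
--     period_ind = answer[:5].find('.')
--     colon_ind = answer[:5].find(':')
--     dash_ind = answer[:5].find('-')
--     paren_ind = answer[:5].find('(')
--     first_ind = min((ind for ind in [period_ind, colon_ind, dash_ind, paren_ind] if ind != -1), default=-1)
--
--     if first_ind == -1:  # period, colon, and dash not found in the first 5 characters
--         return answer.strip()
--     else:
--         return answer[:first_ind].strip()
-- ===== SOURCE B (Python) =====
-- def remove_extra(answer):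
--     for i, c in enumerate(answer[:5]):
--         if c in '.:-(':
--             return answer[:i].strip()
--     return answer.strip()
-- ===== Notes on version B (the rewrite author's own statement) =====
-- stated objective: simpler
-- what changed: Replaces four separate substring-find passes plus a filtered min-reduction with a single left-to-right enumerate scan over answer[:5] that stops at the first punctuation character.
import Mathlib
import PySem

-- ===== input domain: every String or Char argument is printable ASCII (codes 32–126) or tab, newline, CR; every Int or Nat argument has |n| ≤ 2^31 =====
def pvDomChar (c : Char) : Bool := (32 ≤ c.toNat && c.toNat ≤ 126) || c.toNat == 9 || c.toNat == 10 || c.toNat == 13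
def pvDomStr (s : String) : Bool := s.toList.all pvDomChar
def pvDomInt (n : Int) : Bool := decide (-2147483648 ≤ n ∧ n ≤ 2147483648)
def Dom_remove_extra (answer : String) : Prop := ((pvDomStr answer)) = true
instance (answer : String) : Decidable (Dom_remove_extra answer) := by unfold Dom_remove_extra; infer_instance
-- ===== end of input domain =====

-- B replaces four separate find passes + a filtered min with one left-to-right scan over answer[:5] (simpler decomposition, same cost).


-- ===== PORT A =====
def remove_extra (answer : String) : String :=
  let head := PySem.Str.slice answer none (some 5)
  let period_ind := PySem.Str.find head "."
  let colon_ind := PySem.Str.find head ":"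
  let dash_ind := PySem.Str.find head "-"
  let paren_ind := PySem.Str.find head "("
  let first_ind :=
    match PySem.List.min?
        (([period_ind, colon_ind, dash_ind, paren_ind]).filter (fun ind => decide (ind ≠ -1)))
        (fun x => x) with
    | some m => m
    | none => -1
  if first_ind = -1 then PySem.Str.strip answer
  else PySem.Str.strip (PySem.Str.slice answer none (some first_ind))

-- ===== PORT B =====
-- c in '.:-('
def pvIsPunct (c : Char) : Bool := c = '.' || c = ':' || c = '-' || c = '('

-- the 'for i, c in enumerate(answer[:5])' loop with early return, as structural recursion
def pvFindPunct : List Char → Int → Option Int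
  | [], _ => none
  | c :: rest, i => if pvIsPunct c then some i else pvFindPunct rest (i + 1)

def remove_extra_alt (answer : String) : String :=
  match pvFindPunct (PySem.Str.slice answer none (some 5)).toList 0 with
  | some i => PySem.Str.strip (PySem.Str.slice answer none (some i))
  | none => PySem.Str.strip answer

-- ===== PRECONDITION & SPEC =====
def Spec_remove_extra (answer : String) (out : String) : Prop := out = remove_extra_alt answer
instance (answer : String) (out : String) : Decidable (Spec_remove_extra answer out) := by unfold Spec_remove_extra; infer_instance

-- ===== CLAIM (what is proved, stated in full; the proofs are below) =====
def Claim_equal_remove_extra : Prop := ∀ (answer : String), Dom_remove_extra answer → Spec_remove_extra answer (remove_extra answer)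

-- ===== LEMMAS AND PROOFS =====

-- A's 'min(..., default=-1)' step, factored for the proofs
def pvMinInd (l : List Int) : Int :=
  match PySem.List.min? (l.filter (fun ind => decide (ind ≠ -1))) (fun x => x) with
  | some m => m
  | none => -1

def pvShift (x : Int) : Int := if x = -1 then -1 else x + 1

def pvRes (o : Option Int) : Int := match o with | some i => i | none => -1

theorem pv_singleton_prefix_iff (d : Char) (t : List Char) : [d] <+: t ↔ t.head? = some d := by
  cases t with
  | nil => simp
  | cons c r => simp [List.cons_prefix_cons, eq_comm]

theorem pv_prefix_drop (d : Char) (l : List Char) (j : Nat) :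
    [d] <+: l.drop j ↔ l[j]? = some d := by
  rw [pv_singleton_prefix_iff, List.head?_drop]

theorem pv_find_single_neg_one_iff (l : List Char) (d : Char) :
    PySem.Chars.find l [d] = -1 ↔ d ∉ l := by
  rw [PySem.Chars.find_eq_neg_one_iff]
  constructor
  · intro h hm
    apply h
    rw [← PySem.Chars.isIn_iff_infix, ← PySem.Chars.exists_prefix_drop_iff_isIn]
    obtain ⟨j, hj, hget⟩ := List.getElem_of_mem hm
    exact ⟨j, (pv_prefix_drop d l j).mpr (by simp [hj, hget])⟩
  · intro h hinf
    rw [← PySem.Chars.isIn_iff_infix, ← PySem.Chars.exists_prefix_drop_iff_isIn] at hinf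
    obtain ⟨j, hj⟩ := hinf
    exact h (List.mem_of_getElem? ((pv_prefix_drop d l j).mp hj))

theorem pv_find_cons_single (a d : Char) (cs : List Char) :
    PySem.Chars.find (a :: cs) [d] =
      if a = d then 0 else pvShift (PySem.Chars.find cs [d]) := by
  by_cases had : a = d
  · subst had
    rw [if_pos rfl]
    have hne : PySem.Chars.find (a :: cs) [a] ≠ -1 := by
      intro h
      exact ((pv_find_single_neg_one_iff _ _).mp h) (by simp)
    have h0 : 0 ≤ PySem.Chars.find (a :: cs) [a] := by
      have := PySem.Chars.neg_one_le_find (a :: cs) [a]; omega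
    obtain ⟨hpre, hmin⟩ := PySem.Chars.find_spec h0
    by_contra hne0
    have hpos : 0 < (PySem.Chars.find (a :: cs) [a]).toNat := by
      have := Int.toNat_of_nonneg h0
      omega
    exact hmin 0 hpos ((pv_prefix_drop a (a :: cs) 0).mpr (by simp))
  · rw [if_neg had]
    unfold pvShift
    by_cases hf : PySem.Chars.find cs [d] = -1
    · rw [if_pos hf]
      refine (pv_find_single_neg_one_iff _ _).mpr ?_
      simp only [List.mem_cons, not_or]
      exact ⟨fun h => had h.symm, (pv_find_single_neg_one_iff cs d).mp hf⟩
    · rw [if_neg hf]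
      have h0 : 0 ≤ PySem.Chars.find cs [d] := by
        have := PySem.Chars.neg_one_le_find cs [d]; omega
      obtain ⟨hpre, hmin⟩ := PySem.Chars.find_spec h0
      have hkd : cs[(PySem.Chars.find cs [d]).toNat]? = some d :=
        (pv_prefix_drop d cs _).mp hpre
      have hne : PySem.Chars.find (a :: cs) [d] ≠ -1 := by
        intro h
        exact ((pv_find_single_neg_one_iff _ _).mp h)
          (List.mem_cons_of_mem a (List.mem_of_getElem? hkd))
      have h0' : 0 ≤ PySem.Chars.find (a :: cs) [d] := by
        have := PySem.Chars.neg_one_le_find (a :: cs) [d]; omega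
      obtain ⟨hpre', hmin'⟩ := PySem.Chars.find_spec h0'
      have hnd : (a :: cs)[(PySem.Chars.find (a :: cs) [d]).toNat]? = some d :=
        (pv_prefix_drop d (a :: cs) _).mp hpre'
      have hidx : ∀ (m : Nat), m ≠ 0 → ((a :: cs)[m]? : Option Char) = cs[m - 1]? := by
        intro m hm
        cases m with
        | zero => exact absurd rfl hm
        | succ p => simp
      have hn0 : (PySem.Chars.find (a :: cs) [d]).toNat ≠ 0 := by
        intro h
        rw [h] at hnd
        simp at hnd
        exact had hnd
      have hnd' : cs[(PySem.Chars.find (a :: cs) [d]).toNat - 1]? = some d := by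
        rw [← hidx _ hn0]; exact hnd
      have hge : ¬ ((PySem.Chars.find (a :: cs) [d]).toNat - 1 < (PySem.Chars.find cs [d]).toNat) := by
        intro hlt
        exact hmin _ hlt ((pv_prefix_drop d cs _).mpr hnd')
      have hle : ¬ ((PySem.Chars.find cs [d]).toNat + 1 < (PySem.Chars.find (a :: cs) [d]).toNat) := by
        intro hlt
        refine hmin' _ hlt ((pv_prefix_drop d (a :: cs) _).mpr ?_)
        simpa using hkd
      have e1 := Int.toNat_of_nonneg h0
      have e2 := Int.toNat_of_nonneg h0'
      omega

theorem pvFindPunct_shift (cs : List Char) : ∀ (i : Int),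
    pvFindPunct cs i = (pvFindPunct cs 0).map (· + i) := by
  induction cs with
  | nil => intro i; simp [pvFindPunct]
  | cons c r ih =>
    intro i
    by_cases hc : pvIsPunct c
    · simp [pvFindPunct, hc]
    · simp only [pvFindPunct, hc, Bool.false_eq_true, if_false]
      rw [ih (i + 1), ih (0 + 1)]
      cases pvFindPunct r 0 with
      | none => simp
      | some k => simp; ring

theorem pvFindPunct_nonneg (cs : List Char) (k : Int) (h : pvFindPunct cs 0 = some k) : 0 ≤ k := by
  induction cs generalizing k with
  | nil => simp [pvFindPunct] at h
  | cons c r ih =>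
    by_cases hc : pvIsPunct c
    · simp [pvFindPunct, hc] at h; omega
    · simp only [pvFindPunct, hc, Bool.false_eq_true, if_false] at h
      rw [pvFindPunct_shift r (0 + 1)] at h
      cases hr : pvFindPunct r 0 with
      | none => rw [hr] at h; simp at h
      | some m => rw [hr] at h; simp at h; have := ih m hr; omega

theorem pv_foldl_min_map (t : List Int) : ∀ (x : Int),
    (t.map (· + 1)).foldl min (x + 1) = t.foldl min x + 1 := by
  induction t with
  | nil => intro x; simp
  | cons a r ih =>
    intro x
    simp only [List.map_cons, List.foldl_cons]
    rw [min_add_add_right, ih]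

theorem pv_filter_map_shift (l : List Int) (h : ∀ x ∈ l, -1 ≤ x) :
    (l.map pvShift).filter (fun ind => !decide (ind = -1)) =
      (l.filter (fun ind => !decide (ind = -1))).map (· + 1) := by
  induction l with
  | nil => simp
  | cons a r ih =>
    have ha : -1 ≤ a := h a (by simp)
    have ih' := ih (fun x hx => h x (List.mem_cons_of_mem a hx))
    simp only [List.map_cons, List.filter_cons]
    by_cases haa : a = -1
    · subst haa
      have hs : pvShift (-1 : Int) = -1 := by simp [pvShift]
      rw [hs]
      simp [ih']
    · have hs : pvShift a = a + 1 := by simp [pvShift, haa]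
      rw [hs]
      have h1 : (!decide (a + 1 = -1)) = true := by simp; omega
      have h2 : (!decide (a = -1)) = true := by simp [haa]
      rw [h1, h2]
      simp [ih']

theorem pvMinInd_shift (l : List Int) (h : ∀ x ∈ l, -1 ≤ x) :
    pvMinInd (l.map pvShift) = pvShift (pvMinInd l) := by
  unfold pvMinInd
  simp only [ne_eq, decide_not]
  rw [pv_filter_map_shift l h]
  cases hl : l.filter (fun ind => !decide (ind = -1)) with
  | nil => simp [PySem.List.min?, pvShift]
  | cons x t =>
    rw [List.map_cons, PySem.List.min?_id_cons, PySem.List.min?_id_cons]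
    simp only
    rw [pv_foldl_min_map]
    have hx : t.foldl min x ∈ x :: t :=
      PySem.List.min?_mem (xs := x :: t) (key := fun y : Int => y) (m := t.foldl min x)
        (by rw [PySem.List.min?_id_cons])
    have hne : t.foldl min x ≠ -1 := by
      have hmem : t.foldl min x ∈ l.filter (fun ind => !decide (ind = -1)) := hl ▸ hx
      have := List.of_mem_filter hmem
      simpa using this
    simp only [pvShift, if_neg hne]

theorem pvMinInd_zero (l : List Int) (h0 : (0 : Int) ∈ l) (h : ∀ x ∈ l, x = -1 ∨ 0 ≤ x) :
    pvMinInd l = 0 := by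
  unfold pvMinInd
  have h0f : (0 : Int) ∈ l.filter (fun ind => decide (ind ≠ -1)) := by
    rw [List.mem_filter]; simp [h0]
  cases hm : PySem.List.min? (l.filter (fun ind => decide (ind ≠ -1))) (fun x => x) with
  | none =>
    rw [PySem.List.min?_eq_none_iff] at hm
    rw [hm] at h0f
    simp at h0f
  | some m =>
    simp only
    have hmem := PySem.List.min?_mem hm
    have hmin := PySem.List.min?_isMin hm
    have hle : m ≤ 0 := hmin 0 h0f
    have hml : m ∈ l := (List.mem_filter.mp hmem).1
    have hmne : m ≠ -1 := by
      have := (List.mem_filter.mp hmem).2; simpa using this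
    rcases h m hml with h1 | h1
    · exact absurd h1 hmne
    · omega

theorem pv_main (cs : List Char) :
    pvMinInd [PySem.Chars.find cs ['.'], PySem.Chars.find cs [':'],
              PySem.Chars.find cs ['-'], PySem.Chars.find cs ['(']] =
      pvRes (pvFindPunct cs 0) := by
  induction cs with
  | nil =>
    have h : ∀ d : Char, PySem.Chars.find [] [d] = -1 := by
      intro d; rw [pv_find_single_neg_one_iff]; simp
    rw [h, h, h, h]
    decide
  | cons a cs ih =>
    rw [pv_find_cons_single, pv_find_cons_single, pv_find_cons_single, pv_find_cons_single]
    by_cases hp : pvIsPunct a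
    · have hres : pvRes (pvFindPunct (a :: cs) 0) = 0 := by
        simp [pvFindPunct, hp, pvRes]
      rw [hres]
      apply pvMinInd_zero
      · have hcase : a = '.' ∨ a = ':' ∨ a = '-' ∨ a = '(' := by
          by_contra hcon
          push Not at hcon
          simp [pvIsPunct, hcon.1, hcon.2.1, hcon.2.2.1, hcon.2.2.2] at hp
        rcases hcase with h | h | h | h <;> simp [h]
      · intro x hx
        have hshift : ∀ d : Char, pvShift (PySem.Chars.find cs [d]) = -1 ∨
            0 ≤ pvShift (PySem.Chars.find cs [d]) := by
          intro d
          have := PySem.Chars.neg_one_le_find cs [d]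
          by_cases h : PySem.Chars.find cs [d] = -1
          · left; simp [pvShift, h]
          · right; simp [pvShift, h]; omega
        simp only [List.mem_cons, List.not_mem_nil, or_false] at hx
        rcases hx with h | h | h | h <;> rw [h] <;> split_ifs <;>
          first
          | (right; omega)
          | exact hshift _
    · have ha : ∀ d ∈ ['.', ':', '-', '('], a ≠ d := by
        intro d hd had
        apply hp
        subst had
        simp only [List.mem_cons, List.not_mem_nil, or_false] at hd
        rcases hd with h | h | h | h <;> simp [pvIsPunct, h]
      rw [if_neg (ha '.' (by simp)), if_neg (ha ':' (by simp)),
          if_neg (ha '-' (by simp)), if_neg (ha '(' (by simp))]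
      have hlist : [pvShift (PySem.Chars.find cs ['.']), pvShift (PySem.Chars.find cs [':']),
                    pvShift (PySem.Chars.find cs ['-']), pvShift (PySem.Chars.find cs ['('])] =
          ([PySem.Chars.find cs ['.'], PySem.Chars.find cs [':'],
            PySem.Chars.find cs ['-'], PySem.Chars.find cs ['(']]).map pvShift := by
        simp
      rw [hlist, pvMinInd_shift _ (by
        intro x hx
        simp only [List.mem_cons, List.not_mem_nil, or_false] at hx
        rcases hx with h | h | h | h <;> rw [h] <;> exact PySem.Chars.neg_one_le_find cs _), ih]
      have hstep : pvFindPunct (a :: cs) 0 = pvFindPunct cs (0 + 1) := by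
        simp [pvFindPunct, hp]
      rw [hstep, pvFindPunct_shift cs (0 + 1)]
      cases hr : pvFindPunct cs 0 with
      | none => simp [pvRes, pvShift]
      | some k =>
        have hk := pvFindPunct_nonneg cs k hr
        simp only [Option.map_some, pvRes]
        simp [pvShift]
        omega

-- ===== VERDICT (by name: the statement is the Claim_ definition above) =====
theorem remove_extra_spec : Claim_equal_remove_extra := by
  intro answer _
  unfold Spec_remove_extra remove_extra remove_extra_alt
  have e1 : ("." : String).toList = ['.'] := rfl
  have e2 : (":" : String).toList = [':'] := rfl
  have e3 : ("-" : String).toList = ['-'] := rfl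
  have e4 : ("(" : String).toList = ['('] := rfl
  simp only [PySem.Str.find_eq, e1, e2, e3, e4]
  have hmain := pv_main ((PySem.Str.slice answer none (some 5)).toList)
  unfold pvMinInd at hmain
  rw [hmain]
  cases hr : pvFindPunct ((PySem.Str.slice answer none (some 5)).toList) 0 with
  | none => simp [pvRes]
  | some i =>
    have hi := pvFindPunct_nonneg _ i hr
    have hres : pvRes (some i) = i := rfl
    rw [hres]
    rw [if_neg (by omega)]
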